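-- pv_equiv track=rewrite | github.com/alexbarajas/leetcode | interviews/gauntlet_network_2.py | longest_chain
-- ===== SOURCE A (Python) =====
-- def longest_chain(songs, starting_song):
--     song_starts = {}
--     song_ends = {}
--
--     answer = [[]]
--     answer_length = [0]
--
--     for song in songs:
--         if song == starting_song:
--             continue
--         split_song = song.split(" ")
--         if len(split_song) > 1:
--             start_word = split_song[0]
--             end_word = split_song[-1]
--         else:
--             start_word = end_word = song
--         song_starts[start_word] = song_starts.get(start_word, []) + [song]
--         song_ends[end_word] = song_ends.get(end_word, []) + [song]
--
--     def dfs(current_word, chain, current_visited):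
--         possible_next_songs = song_starts.get(current_word, [])
--         if not possible_next_songs:
--             if len(chain) > answer_length[0]:
--                 answer_length[0] = len(chain)
--                 answer[0] = chain.copy()
--             return
--         for next_song in possible_next_songs:
--             if next_song not in visited:
--                 current_visited.add(next_song)
--                 chain.append(next_song)
--                 dfs(next_song.split(" ")[-1], chain, current_visited)
--                 current_visited.remove(next_song)
--                 chain.pop()
--
--     visited = set()
--     visited.add(starting_song)
--
--     dfs(starting_song.split(" ")[-1], [starting_song], visited)
--
--     return answer[0]
-- ===== SOURCE B (Python) =====
-- def longest_chain(songs, starting_song):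
--     song_starts = {}
--     for song in songs:
--         if song == starting_song:
--             continue
--         words = song.split(" ")
--         start_word = words[0] if len(words) > 1 else song
--         song_starts.setdefault(start_word, []).append(song)
--
--     def best(word, visited):
--         """Longest recorded extension below `word`, None if no dead-end is reachable;
--         ties resolved to the first chain in DFS order."""
--         nexts = song_starts.get(word, [])
--         if not nexts:
--             return []
--         result = None
--         for s in nexts:
--             if s in visited:
--                 continue
--             sub = best(s.split(" ")[-1], visited | {s})
--             if sub is not None and (result is None or 1 + len(sub) > len(result)):
--                 result = [s] + sub
--         return result
--
--     ext = best(starting_song.split(" ")[-1], frozenset((starting_song,)))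
--     return [starting_song] + ext if ext is not None else []
-- ===== Notes on version B (the rewrite author's own statement) =====
-- stated objective: simpler
-- what changed: Replaces A's leaf-recording DFS over mutable shared state (global answer/answer_length cell, one visited set mutated and restored around each call, an appended/popped chain list) by a pure value-returning recursion: best(word, visited) returns the longest recorded extension below word (None if no dead end is reachable) and children's results are combined bottom-up with a first-of-max rule; the unused song_ends map is dropped and song_starts is built with setdefault/append instead of A's bucket-copying get(k,[])+[song], which makes the map build linear instead of quadratic.
import Mathlib
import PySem

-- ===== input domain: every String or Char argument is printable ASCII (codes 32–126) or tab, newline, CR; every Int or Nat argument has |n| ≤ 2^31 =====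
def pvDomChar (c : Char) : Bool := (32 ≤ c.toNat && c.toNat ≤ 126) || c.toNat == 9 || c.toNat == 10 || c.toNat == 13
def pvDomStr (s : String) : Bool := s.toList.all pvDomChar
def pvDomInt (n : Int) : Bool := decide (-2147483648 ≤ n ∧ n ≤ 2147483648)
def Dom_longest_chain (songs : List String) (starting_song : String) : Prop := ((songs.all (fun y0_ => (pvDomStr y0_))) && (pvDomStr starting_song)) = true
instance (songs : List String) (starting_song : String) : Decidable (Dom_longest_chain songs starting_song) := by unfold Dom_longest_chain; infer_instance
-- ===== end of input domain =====

-- B replaces A's leaf-recording DFS over mutable globals (answer cell, shared visited set, chain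
-- list) by a pure value-returning recursion that combines children's best extensions bottom-up;
-- objective: simpler (drops the unused song_ends map and all mutable state). Same worst-case cost.

-- ===== PORT A =====
-- song.split(" ") — the separator " " is nonempty, so PySem.Str.split? is always `some`
def pvSplit (s : String) : List String := (PySem.Str.split? s " ").getD []

-- song.split(" ")[-1] — split? with a nonempty separator never returns an empty list, so the default "" is unreachable
def pvEndWord (s : String) : String := (pvSplit s).getLastD ""

-- the `for song in songs:` build loop of A; state = (song_starts, song_ends)
def pvBuildA (songs : List String) (starting_song : String) :
    PySem.Dict String (List String) × PySem.Dict String (List String) :=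
  songs.foldl (fun d song =>
    if song == starting_song then d
    else
      let split_song := pvSplit song
      let sw_ew : String × String :=
        if split_song.length > 1 then ((split_song.headD ""), (split_song.getLastD ""))
        else (song, song)
      (d.1.insert sw_ew.1 (d.1.getD sw_ew.1 [] ++ [song]),
       d.2.insert sw_ew.2 (d.2.getD sw_ew.2 [] ++ [song])))
    (PySem.Dict.empty, PySem.Dict.empty)

-- A's `dfs`: mutates (answer, answer_length), threaded here as the state `st`; `visited` is
-- add-then-removed around each recursive call, i.e. each call sees `visited.add s` and the loop
-- continues with the original `visited`.  `fuel` only makes the recursion structural: the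
-- recursion depth is at most songs.length + 1 (each nested call adds a previously unvisited
-- song to visited), so with the initial fuel the 0 branch is never reached.
def pvDfsA (starts : PySem.Dict String (List String)) :
    Nat → String → List String → PySem.Set String → List String × Nat → List String × Nat
  | 0, _, _, _, st => st
  | fuel + 1, current_word, chain, visited, st =>
    let possible_next_songs := starts.getD current_word []
    if possible_next_songs = [] then
      if chain.length > st.2 then (chain, chain.length) else st
    else
      possible_next_songs.foldl (fun st next_song =>
        if PySem.Set.contains visited next_song then st
        else pvDfsA starts fuel (pvEndWord next_song) (chain ++ [next_song])
               (PySem.Set.add visited next_song) st) st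

def longest_chain (songs : List String) (starting_song : String) : List String :=
  let maps := pvBuildA songs starting_song
  let song_starts := maps.1
  let visited := PySem.Set.add PySem.Set.empty starting_song
  (pvDfsA song_starts (songs.length + 1) (pvEndWord starting_song) [starting_song] visited
    ([], 0)).1

-- ===== PORT B =====
-- Source B's build loop: setdefault(k, []).append(song) is Dict.modify k [] (· ++ [song])
def pvBuildB (songs : List String) (starting_song : String) : PySem.Dict String (List String) :=
  songs.foldl (fun d song =>
    if song == starting_song then d
    else
      let words := pvSplit song
      let start_word := if words.length > 1 then words.headD "" else song
      d.modify start_word [] (· ++ [song]))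
    PySem.Dict.empty

-- Source B's `best`: returns the longest recorded extension below `word` (none if no dead end is
-- reachable), first in DFS order on ties.  Same fuel guard as pvDfsA.
def pvBestB (starts : PySem.Dict String (List String)) :
    Nat → String → PySem.Set String → Option (List String)
  | 0, _, _ => none
  | fuel + 1, word, visited =>
    let nexts := starts.getD word []
    if nexts = [] then some []
    else
      nexts.foldl (fun result s =>
        if PySem.Set.contains visited s then result
        else
          match pvBestB starts fuel (pvEndWord s) (PySem.Set.add visited s) with
          | none => result
          | some sub =>
            match result with
            | none => some (s :: sub)
            | some e => if 1 + sub.length > e.length then some (s :: sub) else result) none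

def longest_chain_alt (songs : List String) (starting_song : String) : List String :=
  let song_starts := pvBuildB songs starting_song
  match pvBestB song_starts (songs.length + 1) (pvEndWord starting_song)
      (PySem.Set.add PySem.Set.empty starting_song) with
  | none => []
  | some ext => starting_song :: ext

-- ===== PRECONDITION & SPEC =====
def Spec_longest_chain (songs : List String) (starting_song : String) (out : List String) : Prop := out = longest_chain_alt songs starting_song
instance (songs : List String) (starting_song : String) (out : List String) : Decidable (Spec_longest_chain songs starting_song out) := by unfold Spec_longest_chain; infer_instance

-- ===== CLAIM (what is proved, stated in full; the proofs are below) =====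
def Claim_equal_longest_chain : Prop := ∀ (songs : List String) (starting_song : String), Dom_longest_chain songs starting_song → Spec_longest_chain songs starting_song (longest_chain songs starting_song)

-- ===== LEMMAS AND PROOFS =====

-- how A's global state (answer, answer_length) is updated by the single best recorded chain
def pvApply (chain : List String) (st : List String × Nat) :
    Option (List String) → List String × Nat
  | none => st
  | some ext =>
    if chain.length + ext.length > st.2 then (chain ++ ext, chain.length + ext.length) else st

theorem pvBuild_aux (starting_song : String) :
    ∀ (l : List String) (dS dE : PySem.Dict String (List String)),
      (l.foldl (fun d song =>
        if song == starting_song then d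
        else
          let split_song := pvSplit song
          let sw_ew : String × String :=
            if split_song.length > 1 then ((split_song.headD ""), (split_song.getLastD ""))
            else (song, song)
          (d.1.insert sw_ew.1 (d.1.getD sw_ew.1 [] ++ [song]),
           d.2.insert sw_ew.2 (d.2.getD sw_ew.2 [] ++ [song]))) (dS, dE)).1
      = l.foldl (fun d song =>
          if song == starting_song then d
          else
            let words := pvSplit song
            let start_word := if words.length > 1 then words.headD "" else song
            d.modify start_word [] (· ++ [song])) dS := by
  intro l
  induction l with
  | nil => intro dS dE; rfl
  | cons song rest ih =>
    intro dS dE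
    simp only [List.foldl_cons]
    by_cases h : (song == starting_song) = true
    · simp only [h, if_true]
      exact ih dS dE
    · simp only [h, Bool.false_eq_true, if_false]
      by_cases hl : (pvSplit song).length > 1
      · simp only [hl, if_true]
        exact ih _ _
      · simp only [hl, if_false]
        exact ih _ _

theorem pvBuild_eq (songs : List String) (starting_song : String) :
    (pvBuildA songs starting_song).1 = pvBuildB songs starting_song :=
  pvBuild_aux starting_song songs PySem.Dict.empty PySem.Dict.empty

theorem pvPairCongr {a b : List String} {m n : Nat} (h1 : a = b) (h2 : m = n) :
    ((a, m) : List String × Nat) = (b, n) := by rw [h1, h2]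

-- one step of the successor loop: applying the child's extension after the state summarised by
-- r equals applying the combined accumulator
theorem pvStep1 (chain : List String) (st : List String × Nat) (s : String)
    (o r : Option (List String)) :
    pvApply (chain ++ [s]) (pvApply chain st r) o
      = pvApply chain st
          (match o with
           | none => r
           | some sub =>
             match r with
             | none => some (s :: sub)
             | some e => if 1 + sub.length > e.length then some (s :: sub) else r) := by
  cases o with
  | none => rfl
  | some sub =>
    cases r with
    | none =>
      show pvApply (chain ++ [s]) st (some sub) = pvApply chain st (some (s :: sub))
      simp only [pvApply, List.length_append, List.length_cons, List.length_nil]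
      split_ifs <;> first
        | rfl
        | omega
        | (exact pvPairCongr (by simp) (by omega))
    | some e =>
      show pvApply (chain ++ [s]) (pvApply chain st (some e)) (some sub)
          = pvApply chain st (if 1 + sub.length > e.length then some (s :: sub) else some e)
      by_cases h1 : chain.length + e.length > st.2
      · have hin : pvApply chain st (some e) = (chain ++ e, chain.length + e.length) := by
          simp [pvApply, h1]
        rw [hin]
        by_cases h3 : 1 + sub.length > e.length
        · rw [if_pos h3]
          simp only [pvApply, List.length_append, List.length_cons, List.length_nil]
          split_ifs <;> first
            | rfl
            | omega
            | (exact pvPairCongr (by simp) (by omega))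
        · rw [if_neg h3]
          simp only [pvApply, List.length_append, List.length_cons, List.length_nil]
          split_ifs <;> first
            | rfl
            | omega
      · have hin : pvApply chain st (some e) = st := by
          simp [pvApply, h1]
        rw [hin]
        by_cases h3 : 1 + sub.length > e.length
        · rw [if_pos h3]
          simp only [pvApply, List.length_append, List.length_cons, List.length_nil]
          split_ifs <;> first
            | rfl
            | omega
            | (exact pvPairCongr (by simp) (by omega))
        · rw [if_neg h3]
          simp only [pvApply, List.length_append, List.length_cons, List.length_nil]
          split_ifs <;> first
            | rfl
            | omega

-- the successor loop of A simulates the successor fold of B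
theorem pvLoop (starts : PySem.Dict String (List String)) (fuel : Nat)
    (IH : ∀ (word : String) (chain : List String) (visited : PySem.Set String)
      (st : List String × Nat),
      pvDfsA starts fuel word chain visited st
        = pvApply chain st (pvBestB starts fuel word visited)) :
    ∀ (l : List String) (chain : List String) (visited : PySem.Set String)
      (st : List String × Nat) (r : Option (List String)),
      l.foldl (fun st next_song =>
          if PySem.Set.contains visited next_song then st
          else pvDfsA starts fuel (pvEndWord next_song) (chain ++ [next_song])
                 (PySem.Set.add visited next_song) st) (pvApply chain st r)
        = pvApply chain st
            (l.foldl (fun result s =>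
              if PySem.Set.contains visited s then result
              else
                match pvBestB starts fuel (pvEndWord s) (PySem.Set.add visited s) with
                | none => result
                | some sub =>
                  match result with
                  | none => some (s :: sub)
                  | some e => if 1 + sub.length > e.length then some (s :: sub) else result) r) := by
  intro l
  induction l with
  | nil => intro chain visited st r; rfl
  | cons s rest ihl =>
    intro chain visited st r
    simp only [List.foldl_cons]
    by_cases hv : PySem.Set.contains visited s = true
    · simp only [hv, if_true]
      exact ihl chain visited st r
    · simp only [hv, Bool.false_eq_true, if_false]
      rw [IH (pvEndWord s) (chain ++ [s]) (PySem.Set.add visited s) (pvApply chain st r)]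
      rw [pvStep1]
      exact ihl chain visited st _

-- the central simulation: A's dfs, started on state st, ends in the state obtained by applying
-- B's best extension (if any) at the same fuel
theorem pvDfs_eq_best (starts : PySem.Dict String (List String)) :
    ∀ (fuel : Nat) (word : String) (chain : List String) (visited : PySem.Set String)
      (st : List String × Nat),
      pvDfsA starts fuel word chain visited st
        = pvApply chain st (pvBestB starts fuel word visited) := by
  intro fuel
  induction fuel with
  | zero => intro word chain visited st; rfl
  | succ n IH =>
    intro word chain visited st
    simp only [pvDfsA, pvBestB]
    by_cases h : starts.getD word [] = []
    · simp only [h, if_true]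
      simp [pvApply]
    · simp only [h, if_false]
      exact pvLoop starts n IH (starts.getD word []) chain visited st none

-- ===== VERDICT (by name: the statement is the Claim_ definition above) =====
theorem longest_chain_spec : Claim_equal_longest_chain := by
  intro songs starting_song _
  show (pvDfsA (pvBuildA songs starting_song).1 (songs.length + 1) (pvEndWord starting_song)
      [starting_song] (PySem.Set.add PySem.Set.empty starting_song) ([], 0)).1
    = (match pvBestB (pvBuildB songs starting_song) (songs.length + 1) (pvEndWord starting_song)
        (PySem.Set.add PySem.Set.empty starting_song) with
       | none => ([] : List String)
       | some ext => starting_song :: ext)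
  rw [pvBuild_eq, pvDfs_eq_best]
  cases pvBestB (pvBuildB songs starting_song) (songs.length + 1) (pvEndWord starting_song)
      (PySem.Set.add PySem.Set.empty starting_song) with
  | none => rfl
  | some ext => simp [pvApply]
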